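-- pv_equiv track=rewrite | github.com/JonSteinn/Kattis-Solutions | src/Equal Sums (Easy)/Python 3/equalsumseasy.py | subset_as_list
-- ===== SOURCE A (Python) =====
-- def subset_as_list(lis, x):
--     lst = []
--     i = 0
--     while x > 0:
--         if x&1 == 1:
--             lst += [lis[i]]
--         i += 1
--         x >>= 1
--     return lst
-- ===== SOURCE B (Python) =====
-- def subset_as_list(lis, x):
--     # Recursive decomposition: peel one element / one bit per level, build the
--     # result front-to-back with cons instead of an accumulator-and-index loop.
--     if x <= 0:
--         return []
--     rest = subset_as_list(lis[1:], x >> 1)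
--     return ([lis[0]] + rest) if x & 1 else rest
-- ===== Notes on version B (the rewrite author's own statement) =====
-- stated objective: alternative
-- what changed: B is a structural recursion that peels the head of the list and the low bit of x each level, building the result front-to-back with cons, instead of A's iterative loop with an index counter and an accumulator it appends to.
import Mathlib
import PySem

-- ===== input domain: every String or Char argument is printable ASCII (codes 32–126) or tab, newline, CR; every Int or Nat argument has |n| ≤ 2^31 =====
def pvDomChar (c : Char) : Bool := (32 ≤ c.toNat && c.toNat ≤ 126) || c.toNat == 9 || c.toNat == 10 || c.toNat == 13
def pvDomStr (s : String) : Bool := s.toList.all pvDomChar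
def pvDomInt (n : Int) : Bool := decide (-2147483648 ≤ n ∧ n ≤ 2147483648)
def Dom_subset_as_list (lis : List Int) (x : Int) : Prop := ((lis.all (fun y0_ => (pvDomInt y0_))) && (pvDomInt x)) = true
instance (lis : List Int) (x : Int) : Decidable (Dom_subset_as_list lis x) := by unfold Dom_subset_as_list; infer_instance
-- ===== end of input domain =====

-- B is a head/tail structural recursion building the result with cons, instead of A's indexed loop with an append accumulator; alternative decomposition, same cost.


-- termination helper for both recursions (cited by name in decreasing_by)
theorem pvShiftHalf_lt (x : Int) (h : x > 0) : ((x >>> (1 : Nat)).toNat < x.toNat) := by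
  obtain ⟨n, rfl⟩ : ∃ n : Nat, x = ((n : Nat) : Int) := ⟨x.toNat, by omega⟩
  rw [show ((n : Nat) : Int) >>> (1 : Nat) = ((n >>> 1 : Nat) : Int) from rfl,
    Nat.shiftRight_one]
  omega

-- ===== PORT A =====
-- while x > 0: if x&1 == 1: lst += [lis[i]]; i += 1; x >>= 1
-- lis[i] is ported as pyGet? with default 0; Pre_ restricts to inputs where every
-- accessed index is in range (elsewhere Python raises IndexError).
def subsetLoopA (lis lst : List Int) (i x : Int) : List Int :=
  if h : x > 0 then
    let lst' := if PySem.Int.band x 1 == 1 then lst ++ [(PySem.List.pyGet? lis i).getD 0] else lst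
    subsetLoopA lis lst' (i + 1) (x >>> (1 : Nat))
  else lst
termination_by x.toNat
decreasing_by exact pvShiftHalf_lt x h

def subset_as_list (lis : List Int) (x : Int) : List Int :=
  subsetLoopA lis [] 0 x

-- ===== PORT B =====
-- if x <= 0: return []; rest = subset_as_list(lis[1:], x >> 1);
-- return ([lis[0]] + rest) if x & 1 else rest
def subset_as_list_alt (lis : List Int) (x : Int) : List Int :=
  if h : x ≤ 0 then []
  else
    let rest := subset_as_list_alt (PySem.List.slice lis (some 1) none) (x >>> (1 : Nat))
    if PySem.Int.band x 1 != 0 then (PySem.List.pyGet? lis 0).getD 0 :: rest else rest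
termination_by x.toNat
decreasing_by exact pvShiftHalf_lt x (by omega)

-- ===== PRECONDITION & SPEC =====
-- Pre_ excludes exactly the inputs on which Python A raises IndexError (x ≥ 2^len(lis)
-- makes A — and B — index past the end of lis); A returns normally everywhere else.
def Pre_subset_as_list (lis : List Int) (x : Int) : Prop := x < 2 ^ lis.length
instance (lis : List Int) (x : Int) : Decidable (Pre_subset_as_list lis x) := by
  unfold Pre_subset_as_list; infer_instance

def pvWitness_subset_as_list : List Int × Int := ([4, 7, 9], 5)

def Spec_subset_as_list (lis : List Int) (x : Int) (out : List Int) : Prop := out = subset_as_list_alt lis x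
instance (lis : List Int) (x : Int) (out : List Int) : Decidable (Spec_subset_as_list lis x out) := by
  unfold Spec_subset_as_list; infer_instance

-- ===== CLAIM (what is proved, stated in full; the proofs are below) =====
def Claim_equal_subset_as_list : Prop := ∀ (lis : List Int) (x : Int), Dom_subset_as_list lis x → Pre_subset_as_list lis x → Spec_subset_as_list lis x (subset_as_list lis x)

-- ===== LEMMAS AND PROOFS =====

-- indices of the set bits of n, in increasing order
def bitIdx (n : Nat) : List Nat :=
  if h : n = 0 then []
  else (if n % 2 = 1 then [0] else []) ++ (bitIdx (n / 2)).map (· + 1)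
termination_by n
decreasing_by omega

theorem bitIdx_zero : bitIdx 0 = [] := by rw [bitIdx]; simp

theorem bitIdx_pos (n : Nat) (h : n ≠ 0) :
    bitIdx n = (if n % 2 = 1 then [0] else []) ++ (bitIdx (n / 2)).map (· + 1) := by
  rw [bitIdx]; simp [h]

-- A's loop produces the bitIdx-indexed elements (shifted by i)
theorem loopA_eq (n : Nat) : ∀ (lis lst : List Int) (i : Int),
    subsetLoopA lis lst i ((n : Nat) : Int) =
      lst ++ (bitIdx n).map (fun (j : Nat) => (PySem.List.pyGet? lis (i + ((j : Nat) : Int))).getD 0) := by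
  induction n using Nat.strong_induction_on with
  | _ n ih =>
    intro lis lst i
    by_cases h0 : n = 0
    · subst h0
      rw [subsetLoopA.eq_def, bitIdx_zero]
      norm_num
    · rw [subsetLoopA.eq_def]
      have hpos : ((n : Nat) : Int) > 0 := by omega
      rw [dif_pos hpos]
      have hland : PySem.Int.band ((n : Nat) : Int) 1 = ((n &&& 1 : Nat) : Int) :=
        PySem.Int.band_natCast n 1
      have hmod : n &&& 1 = n % 2 := Nat.and_one_is_mod n
      have hsh : ((n : Nat) : Int) >>> (1 : Nat) = ((n >>> 1 : Nat) : Int) := rfl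
      have hsh2 : n >>> 1 = n / 2 := Nat.shiftRight_one _
      rw [hland, hmod, hsh, hsh2]
      rw [ih (n / 2) (by omega), bitIdx_pos n h0]
      by_cases hpar : n % 2 = 1
      · rw [if_pos (by rw [hpar]; rfl), if_pos hpar]
        simp only [List.map_append, List.map_map, List.map_cons, List.map_nil,
          List.append_assoc, List.singleton_append, List.cons_append, List.nil_append]
        congr 1
        congr 1
        · norm_num
        · exact List.map_congr_left (fun j _ => by
            simp only [Function.comp]
            rw [show i + 1 + ((j : Nat) : Int) = i + (((j + 1 : Nat) : Nat) : Int) by push_cast; ring])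
      · have hpar0 : n % 2 = 0 := by omega
        rw [if_neg (by rw [hpar0]; exact (by decide)), if_neg hpar]
        simp only [List.nil_append, List.map_map]
        congr 1
        exact List.map_congr_left (fun j _ => by
          simp only [Function.comp]
          rw [show i + 1 + ((j : Nat) : Int) = i + (((j + 1 : Nat) : Nat) : Int) by push_cast; ring])

-- B's recursion produces the bitIdx-indexed elements
theorem recB_eq (n : Nat) : ∀ (lis : List Int),
    subset_as_list_alt lis ((n : Nat) : Int) =
      (bitIdx n).map (fun (j : Nat) => (PySem.List.pyGet? lis ((j : Nat) : Int)).getD 0) := by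
  induction n using Nat.strong_induction_on with
  | _ n ih =>
    intro lis
    by_cases h0 : n = 0
    · subst h0
      rw [subset_as_list_alt.eq_def, bitIdx_zero]
      norm_num
    · rw [subset_as_list_alt.eq_def]
      rw [dif_neg (by omega)]
      have hland : PySem.Int.band ((n : Nat) : Int) 1 = ((n &&& 1 : Nat) : Int) :=
        PySem.Int.band_natCast n 1
      have hmod : n &&& 1 = n % 2 := Nat.and_one_is_mod n
      have hsh : ((n : Nat) : Int) >>> (1 : Nat) = ((n >>> 1 : Nat) : Int) := rfl
      have hsh2 : n >>> 1 = n / 2 := Nat.shiftRight_one _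
      simp only [hland, hmod, hsh, hsh2, PySem.List.slice_from_one]
      rw [ih (n / 2) (by omega), bitIdx_pos n h0]
      have htail : ∀ (j : Nat),
          (PySem.List.pyGet? lis.tail ((j : Nat) : Int)).getD 0 =
          (PySem.List.pyGet? lis (((j + 1 : Nat) : Nat) : Int)).getD 0 := by
        intro j
        rw [PySem.List.pyGet?_natCast, PySem.List.pyGet?_natCast,
          ← List.drop_one, List.getElem?_drop, Nat.add_comm 1]
      by_cases hpar : n % 2 = 1
      · rw [if_pos (by rw [hpar]; rfl), if_pos hpar]
        simp only [List.map_append, List.map_map, List.map_cons, List.singleton_append]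
        congr 1
        exact List.map_congr_left (fun j _ => htail j)
      · have hpar0 : n % 2 = 0 := by omega
        rw [if_neg (by rw [hpar0]; exact (by decide)), if_neg hpar]
        simp only [List.nil_append, List.map_map]
        exact List.map_congr_left (fun j _ => htail j)

-- A = B
theorem subsetA_eq_B (lis : List Int) (x : Int) :
    subset_as_list lis x = subset_as_list_alt lis x := by
  by_cases hx : x > 0
  · have hx' : x = ((x.toNat : Nat) : Int) := by omega
    unfold subset_as_list
    rw [hx', loopA_eq, recB_eq]
    simp
  · unfold subset_as_list
    rw [subsetLoopA.eq_def, dif_neg hx, subset_as_list_alt.eq_def, dif_pos (by omega)]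

-- ===== VERDICT (by name: the statement is the Claim_ definition above) =====
theorem subset_as_list_spec : Claim_equal_subset_as_list := by
  intro lis x _ _
  unfold Spec_subset_as_list
  exact subsetA_eq_B lis x
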